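-- pv_equiv track=rewrite | github.com/Stanislav-Kankin/lead_parser | telegram_signals/signal_classifier.py | _looks_like_channel_handle
-- ===== SOURCE A (Python) =====
-- CHANNEL_HANDLE_HINTS = (
--     "wb",
--     "ozon",
--     "market",
--     "seller",
--     "ecom",
--     "business",
--     "biz",
--     "brand",
--     "agency",
--     "media",
--     "news",
--     "store",
--     "shop",
--     "marketplace",
--     "export",
--     "ppt",
--     "design",
--     "promo",
-- )
--
-- def _looks_like_channel_handle(handle: str) -> bool:
--     if not handle:
--         return False
--     if handle.endswith("bot"):
--         return False
--     if any(token in handle for token in CHANNEL_HANDLE_HINTS):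
--         return True
--     if handle.count("_") >= 2:
--         return True
--     return False
-- ===== SOURCE B (Python) =====
-- CHANNEL_HANDLE_HINTS = (
--     "wb",
--     "ozon",
--     "market",
--     "seller",
--     "ecom",
--     "business",
--     "biz",
--     "brand",
--     "agency",
--     "media",
--     "news",
--     "store",
--     "shop",
--     "marketplace",
--     "export",
--     "ppt",
--     "design",
--     "promo",
-- )
--
--
-- def _looks_like_channel_handle(handle: str) -> bool:
--     # Single left-to-right scan: at each position test every hint by
--     # startswith-at-offset, and count underscores in the same pass.
--     if not handle:
--         return False
--     if handle.endswith("bot"):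
--         return False
--     underscores = 0
--     for i in range(len(handle)):
--         if handle[i] == "_":
--             underscores += 1
--         for hint in CHANNEL_HANDLE_HINTS:
--             if handle.startswith(hint, i):
--                 return True
--     return underscores >= 2
-- ===== Notes on version B (the rewrite author's own statement) =====
-- stated objective: alternative
-- what changed: Replaces the per-hint substring-containment loop plus a separate underscore-count pass with one left-to-right scan over string positions that tests each hint via startswith at the current offset and counts underscores in the same pass.
import Mathlib
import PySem

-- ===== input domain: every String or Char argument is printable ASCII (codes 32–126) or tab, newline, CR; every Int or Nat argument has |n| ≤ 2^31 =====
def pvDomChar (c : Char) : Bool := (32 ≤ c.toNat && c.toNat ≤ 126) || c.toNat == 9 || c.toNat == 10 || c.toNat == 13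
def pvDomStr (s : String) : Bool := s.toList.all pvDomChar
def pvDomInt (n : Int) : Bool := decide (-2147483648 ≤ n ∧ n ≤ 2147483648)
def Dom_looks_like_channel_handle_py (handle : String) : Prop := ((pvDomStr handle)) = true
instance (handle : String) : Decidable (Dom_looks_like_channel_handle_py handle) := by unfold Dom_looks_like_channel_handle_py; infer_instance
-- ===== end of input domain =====

-- B scans the string once, testing each hint by startswith at every offset and
-- counting underscores in the same pass (objective: alternative, same cost).

-- shared module constant CHANNEL_HANDLE_HINTS
def channelHandleHints : List String :=
  ["wb", "ozon", "market", "seller", "ecom", "business", "biz", "brand",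
   "agency", "media", "news", "store", "shop", "marketplace", "export",
   "ppt", "design", "promo"]

-- ===== PORT A =====
def looks_like_channel_handle_py (handle : String) : Bool :=
  if handle = "" then false
  else if PySem.Str.endswith handle "bot" then false
  else if channelHandleHints.any (fun token => PySem.Str.isIn token handle) then true
  else if 2 ≤ PySem.Str.count handle "_" then true
  else false

-- ===== PORT B =====
-- the scan loop of B: position loop over suffixes, underscore counter threaded through
def altScan (cs : List Char) (underscores : Nat) : Bool :=
  match cs with
  | [] => decide (2 ≤ underscores)
  | c :: rest =>
      let u' := if c = '_' then underscores + 1 else underscores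
      if channelHandleHints.any (fun hint => PySem.Chars.startswith (c :: rest) hint.toList) then
        true
      else altScan rest u'

def looks_like_channel_handle_py_alt (handle : String) : Bool :=
  if handle = "" then false
  else if PySem.Str.endswith handle "bot" then false
  else altScan handle.toList 0

-- ===== PRECONDITION & SPEC =====
def Spec_looks_like_channel_handle_py (handle : String) (out : Bool) : Prop := out = looks_like_channel_handle_py_alt handle
instance (handle : String) (out : Bool) : Decidable (Spec_looks_like_channel_handle_py handle out) := by unfold Spec_looks_like_channel_handle_py; infer_instance

-- ===== CLAIM (what is proved, stated in full; the proofs are below) =====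
def Claim_equal_looks_like_channel_handle_py : Prop := ∀ (handle : String), Dom_looks_like_channel_handle_py handle → Spec_looks_like_channel_handle_py handle (looks_like_channel_handle_py handle)

-- ===== LEMMAS AND PROOFS =====

-- Chars.count with a single-character needle is List.count (no PySem bridge lemma exists for this)
lemma countGo_underscore (l : List Char) : ∀ (fuel acc : Nat), l.length ≤ fuel →
    PySem.Chars.count.go ['_'] fuel l acc = acc + l.count '_' := by
  induction l with
  | nil =>
      intro fuel acc _
      cases fuel <;> simp [PySem.Chars.count.go]
  | cons c t ih =>
      intro fuel acc hle
      cases fuel with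
      | zero => simp at hle
      | succ n =>
          by_cases hc : c = '_'
          · subst hc
            have : PySem.Chars.count.go ['_'] (n+1) ('_' :: t) acc
                = PySem.Chars.count.go ['_'] n t (acc + 1) := by
              simp [PySem.Chars.count.go, List.isPrefixOf]
            rw [this, ih n (acc + 1) (by simpa using hle)]
            simp
            omega
          · have : PySem.Chars.count.go ['_'] (n+1) (c :: t) acc
                = PySem.Chars.count.go ['_'] n t acc := by
              simp [PySem.Chars.count.go, List.isPrefixOf]
              intro h
              exact ((hc h.symm).elim)
            rw [this, ih n acc (by simpa using hle)]
            simp [hc]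

lemma count_underscore (l : List Char) : PySem.Chars.count l ['_'] = l.count '_' := by
  have h := countGo_underscore l l.length 0 (le_refl _)
  simpa [PySem.Chars.count] using h

-- characterisation of B's scan loop
lemma altScan_eq (l : List Char) : ∀ (u : Nat),
    altScan l u =
      (l.tails.any (fun t => channelHandleHints.any
          (fun hint => PySem.Chars.startswith t hint.toList))
        || decide (2 ≤ u + l.count '_')) := by
  induction l with
  | nil =>
      intro u
      simp [altScan, channelHandleHints, PySem.Chars.startswith]
  | cons c rest ih =>
      intro u
      by_cases h : channelHandleHints.any
          (fun hint => PySem.Chars.startswith (c :: rest) hint.toList) = true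
      · simp [altScan, h]
      · have hb : channelHandleHints.any
            (fun hint => PySem.Chars.startswith (c :: rest) hint.toList) = false := by
          simpa using h
        by_cases hc : c = '_'
        · subst hc
          rw [show altScan ('_' :: rest) u = altScan rest (u + 1) by
            simp [altScan, hb]]
          rw [ih (u + 1)]
          simp only [List.tails_cons, List.any_cons, hb, Bool.false_or, List.count_cons]
          congr 1
          simp only [decide_eq_decide, beq_self_eq_true, if_true]
          omega
        · rw [show altScan (c :: rest) u = altScan rest u by
            simp [altScan, hb, hc]]
          rw [ih u]
          simp [hb, hc]

-- A's "any hint is a substring" equals B's "some suffix starts with some hint"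
lemma any_isIn_eq_tails (l : List Char) :
    channelHandleHints.any (fun token => PySem.Chars.isIn token.toList l) =
      l.tails.any (fun t => channelHandleHints.any
        (fun hint => PySem.Chars.startswith t hint.toList)) := by
  rw [Bool.eq_iff_iff]
  simp only [List.any_eq_true, PySem.Chars.isIn_iff_infix, List.mem_tails,
    PySem.Chars.startswith_iff, List.infix_iff_prefix_suffix]
  constructor
  · rintro ⟨s, hs, t, hpre, hsuf⟩
    exact ⟨t, hsuf, s, hs, hpre⟩
  · rintro ⟨t, hsuf, s, hs, hpre⟩
    exact ⟨s, hs, t, hpre, hsuf⟩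

-- ===== VERDICT (by name: the statement is the Claim_ definition above) =====
theorem looks_like_channel_handle_py_spec : Claim_equal_looks_like_channel_handle_py := by
  intro handle _
  unfold Spec_looks_like_channel_handle_py
  have hc : PySem.Str.count handle "_" = handle.toList.count '_' := by
    simpa [PySem.Str.count] using count_underscore handle.toList
  have ha : (channelHandleHints.any fun token => PySem.Str.isIn token handle)
      = handle.toList.tails.any (fun t => channelHandleHints.any
          fun hint => PySem.Chars.startswith t hint.toList) := by
    simpa [PySem.Str.isIn] using any_isIn_eq_tails handle.toList
  unfold looks_like_channel_handle_py looks_like_channel_handle_py_alt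
  by_cases h0 : handle = ""
  · rw [if_pos h0, if_pos h0]
  · rw [if_neg h0, if_neg h0]
    by_cases h1 : PySem.Str.endswith handle "bot" = true
    · rw [if_pos h1, if_pos h1]
    · rw [if_neg h1, if_neg h1]
      rw [altScan_eq handle.toList 0, ← ha, Nat.zero_add, ← hc]
      by_cases h2 : (channelHandleHints.any fun token => PySem.Str.isIn token handle) = true
      · rw [if_pos h2, h2, Bool.true_or]
      · rw [if_neg h2, (Bool.not_eq_true _).mp h2, Bool.false_or]
        by_cases h3 : 2 ≤ PySem.Str.count handle "_"
        · rw [if_pos h3, decide_eq_true h3]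
        · rw [if_neg h3, decide_eq_false h3]
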